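-- pv_equiv track=rewrite | github.com/adonlic/arh1 | FRISC/assembler/frisc/instr_format.py | __putCommas
-- ===== SOURCE A (Python) =====
-- def __putCommas(formats: list):
--     new_formats = list()
--
--     for f in formats:
--         tokens = f.split('|')
--         new_format = list()
--         new_format.append(tokens[0])    # append mnemonic
--         no_more_commas = False
--
--         if len(tokens) > 1:
--             new_format.append(tokens[1])
--
--             if len(tokens) > 2:
--                 for token_id in range(2, len(tokens)):
--                     if tokens[token_id] == '(':
--                         no_more_commas = True
--                     if no_more_commas:
--                         new_format.append(tokens[token_id])
--                         continue
--
--                     new_format.append(',')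
--                     new_format.append(tokens[token_id])
--
--         new_formats.append(new_format)
--
--     return new_formats
-- ===== SOURCE B (Python) =====
-- def __putCommas(formats: list):
--     new_formats = []
--     for f in formats:
--         tokens = f.split('|')
--         rest = tokens[2:]
--         cut = rest.index('(') if '(' in rest else len(rest)
--         new_formats.append(tokens[:2]
--                            + [x for t in rest[:cut] for x in (',', t)]
--                            + rest[cut:])
--     return new_formats
-- ===== Notes on version B (the rewrite author's own statement) =====
-- stated objective: simpler
-- what changed: Replaces A's stateful single pass (a no_more_commas boolean flag flipped inside an index loop over tokens[2:]) with a slice decomposition: locate the '(' cut with index, then build tokens[:2] + a comma-interleaved comprehension of rest[:cut] + the untouched tail rest[cut:].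
import Mathlib
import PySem

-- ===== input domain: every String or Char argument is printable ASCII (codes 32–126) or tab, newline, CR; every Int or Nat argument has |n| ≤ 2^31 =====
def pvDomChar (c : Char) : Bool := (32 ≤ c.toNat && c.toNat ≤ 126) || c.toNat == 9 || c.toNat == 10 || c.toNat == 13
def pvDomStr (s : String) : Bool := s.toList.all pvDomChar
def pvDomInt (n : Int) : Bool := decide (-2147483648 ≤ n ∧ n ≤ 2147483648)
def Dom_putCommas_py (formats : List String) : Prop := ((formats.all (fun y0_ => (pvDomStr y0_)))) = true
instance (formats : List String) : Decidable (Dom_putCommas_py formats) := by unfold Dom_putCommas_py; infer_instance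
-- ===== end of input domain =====

-- B replaces A's boolean-flag index loop with a slice decomposition: find the '(' cut,
-- then build head ++ comma-interleaved middle ++ plain tail (objective: simpler).


-- ===== PORT A =====
-- body of A's inner for-loop (state = (new_format, no_more_commas), tok = tokens[token_id])
def pvStepA (st : List String × Bool) (tok : String) : List String × Bool :=
  let no_more_commas := if tok == "(" then true else st.2
  if no_more_commas then (st.1 ++ [tok], no_more_commas)
  else (st.1 ++ [",", tok], no_more_commas)

def putCommas_py (formats : List String) : List (List String) :=
  formats.foldl (fun new_formats f =>
    let tokens := (PySem.Str.split? f "|").getD []      -- '|' ≠ '', so split? is always `some`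
    let new_format := [PySem.List.pyGetD tokens 0 ""]   -- tokens[0]; split never returns [], so in range
    let new_format :=
      if tokens.length > 1 then
        let new_format := new_format ++ [PySem.List.pyGetD tokens 1 ""]
        if tokens.length > 2 then
          ((PySem.List.pyRange 2 (PySem.List.len tokens)).foldl
            (fun st token_id => pvStepA st (PySem.List.pyGetD tokens token_id ""))
            (new_format, false)).1
        else new_format
      else new_format
    new_formats ++ [new_format]) []

-- ===== PORT B =====
def putCommas_py_alt (formats : List String) : List (List String) :=
  formats.map (fun f =>
    let tokens := (PySem.Str.split? f "|").getD []
    let rest := tokens.drop 2                           -- tokens[2:]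
    let cut := (PySem.List.index? rest "(").getD rest.length
    tokens.take 2                                       -- tokens[:2]
      ++ (rest.take cut).flatMap (fun t => [",", t])    -- the comprehension in Source B
      ++ rest.drop cut)                                 -- rest[cut:]

-- ===== PRECONDITION & SPEC =====
def Spec_putCommas_py (formats : List String) (out : List (List String)) : Prop := out = putCommas_py_alt formats
instance (formats : List String) (out : List (List String)) : Decidable (Spec_putCommas_py formats out) := by unfold Spec_putCommas_py; infer_instance

-- ===== CLAIM (what is proved, stated in full; the proofs are below) =====
def Claim_equal_putCommas_py : Prop := ∀ (formats : List String), Dom_putCommas_py formats → Spec_putCommas_py formats (putCommas_py formats)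

-- ===== LEMMAS AND PROOFS =====
theorem go_ne_nil (sep : List Char) (fuel : Nat) (l cur : List Char) (acc : List (List Char)) :
    PySem.Chars.splitOn.go sep fuel l cur acc ≠ [] := by
  induction fuel generalizing l cur acc with
  | zero => simp [PySem.Chars.splitOn.go]
  | succ n ih =>
    cases l with
    | nil => simp [PySem.Chars.splitOn.go]
    | cons c rest =>
      rw [PySem.Chars.splitOn.go]
      split_ifs <;> apply ih

theorem tokens_ne_nil (f : String) : (PySem.Str.split? f "|").getD [] ≠ [] := by
  have h := go_ne_nil ("|".toList) (f.toList.length + 1) f.toList [] []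
  simp [PySem.Str.split?, PySem.Chars.split?, PySem.Chars.splitOn, List.map_eq_nil_iff] at h ⊢
  exact h

theorem foldl_pvStepA_true (rs : List String) (acc : List String) :
    rs.foldl pvStepA (acc, true) = (acc ++ rs, true) := by
  induction rs generalizing acc with
  | nil => simp
  | cons t rs ih => simp [List.foldl_cons, pvStepA, ih]

theorem foldl_pvStepA_false (rs : List String) (acc : List String) :
    (rs.foldl pvStepA (acc, false)).1 =
      acc ++ (rs.take ((PySem.List.index? rs "(").getD rs.length)).flatMap (fun t => [",", t])
          ++ rs.drop ((PySem.List.index? rs "(").getD rs.length) := by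
  induction rs generalizing acc with
  | nil => simp
  | cons t rs ih =>
    by_cases ht : t = "("
    · subst ht
      have h1 : pvStepA (acc, false) "(" = (acc ++ ["("], true) := by simp [pvStepA]
      rw [List.foldl_cons, h1, foldl_pvStepA_true]
      rw [PySem.List.index?_cons_self]
      simp
    · have h1 : pvStepA (acc, false) t = (acc ++ [",", t], false) := by
        simp [pvStepA, ht]
      rw [List.foldl_cons, h1, ih]
      rw [PySem.List.index?_cons_of_ne rs ht]
      cases hidx : PySem.List.index? rs "(" with
      | none => simp
      | some k => simp

theorem body_eq (tokens : List String) (h : tokens ≠ []) :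
    (let new_format := [PySem.List.pyGetD tokens 0 ""]
     if tokens.length > 1 then
        let new_format := new_format ++ [PySem.List.pyGetD tokens 1 ""]
        if tokens.length > 2 then
          ((PySem.List.pyRange 2 (PySem.List.len tokens)).foldl
            (fun st token_id => pvStepA st (PySem.List.pyGetD tokens token_id ""))
            (new_format, false)).1
        else new_format
      else new_format) =
    (tokens.take 2
      ++ ((tokens.drop 2).take ((PySem.List.index? (tokens.drop 2) "(").getD (tokens.drop 2).length)).flatMap (fun t => [",", t])
      ++ (tokens.drop 2).drop ((PySem.List.index? (tokens.drop 2) "(").getD (tokens.drop 2).length)) := by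
  match tokens with
  | [] => exact absurd rfl h
  | [t0] => simp [PySem.List.pyGetD_zero_cons]
  | t0 :: t1 :: rs =>
    have hr := PySem.List.foldl_pyRange_pyGetD (t0 :: t1 :: rs) "" pvStepA ([t0, t1], false) (a := 2) (by norm_num)
    cases rs with
    | nil => simp [PySem.List.pyGetD, PySem.List.pyGet?, PySem.List.pyIdx?]
    | cons t2 rs' =>
      have hl1 : (t0 :: t1 :: t2 :: rs').length > 1 := by simp
      have hl2 : (t0 :: t1 :: t2 :: rs').length > 2 := by simp
      simp only [hl1, hl2, if_true]
      have hpos1 : (0:Int) ≤ (rs'.length:Int) + 1 := by positivity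
      have hpos2 : (0:Int) ≤ (rs'.length:Int) + 1 + 1 := by positivity
      have hget0 : PySem.List.pyGetD (t0 :: t1 :: t2 :: rs') 0 "" = t0 := by
        simp [PySem.List.pyGetD, PySem.List.pyGet?, PySem.List.pyIdx?, hpos2]
      have hget1 : PySem.List.pyGetD (t0 :: t1 :: t2 :: rs') 1 "" = t1 := by
        simp [PySem.List.pyGetD, PySem.List.pyGet?, PySem.List.pyIdx?, hpos1]
      rw [hget0, hget1]
      simp only [List.singleton_append]
      rw [hr, foldl_pvStepA_false]
      simp

-- ===== VERDICT (by name: the statement is the Claim_ definition above) =====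
theorem putCommas_py_spec : Claim_equal_putCommas_py := by
  intro formats _
  unfold Spec_putCommas_py putCommas_py putCommas_py_alt
  rw [PySem.List.foldl_append_singleton_eq_map]
  simp only [List.nil_append]
  apply List.map_congr_left
  intro f _
  exact body_eq _ (tokens_ne_nil f)
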